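-- pv_equiv track=rewrite | github.com/hdaa/omniedu_python | shrinkingCluster.py | colSum
-- ===== SOURCE A (Python) =====
-- def colSum(matriz):
-- 	naoZero = []
-- 	resultMatrix=[]
-- 	for j in range(0,len(matriz[0])):
-- 		clsum = 0
-- 		for i in range(0,len(matriz)):
-- 			clsum = clsum + matriz[i][j]
-- 		if clsum != 0:
-- 			naoZero.append(j)
-- 	montaLinha = []
-- 	for linha in range(0,len(matriz)):
-- 		for n in naoZero:
-- 			montaLinha.append(matriz[linha][n])
-- 		resultMatrix.append(montaLinha)
-- 		montaLinha=[]
-- 	return resultMatrix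
-- ===== SOURCE B (Python) =====
-- def colSum(matriz):
--     acc = [[] for _ in matriz]
--     for j in range(len(matriz[0])):
--         if sum(row[j] for row in matriz) != 0:
--             for r, row in zip(acc, matriz):
--                 r.append(row[j])
--     return acc
-- ===== Notes on version B (the rewrite author's own statement) =====
-- stated objective: alternative
-- what changed: B fuses A's two staged passes (first build the naoZero index list, then rebuild each row by indexing into it) into a single column-major pass that, whenever a column's sum is nonzero, appends that column's entries directly into per-row accumulators; the index list and the second rows-outer/indices-inner pass disappear.
import Mathlib
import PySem

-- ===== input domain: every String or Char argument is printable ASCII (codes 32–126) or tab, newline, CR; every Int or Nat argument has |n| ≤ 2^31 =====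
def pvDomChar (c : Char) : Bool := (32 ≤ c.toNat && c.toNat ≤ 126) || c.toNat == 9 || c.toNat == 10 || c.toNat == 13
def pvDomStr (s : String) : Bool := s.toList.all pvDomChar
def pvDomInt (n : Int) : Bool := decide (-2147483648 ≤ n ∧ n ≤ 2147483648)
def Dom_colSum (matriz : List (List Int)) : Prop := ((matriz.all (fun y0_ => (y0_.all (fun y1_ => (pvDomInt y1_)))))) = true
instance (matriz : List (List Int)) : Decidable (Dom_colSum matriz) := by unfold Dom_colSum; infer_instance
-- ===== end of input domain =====

-- B fuses A's two staged passes into a single column pass appending directly into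
-- per-row accumulators (objective: alternative; same asymptotic cost).

-- ===== PORT A =====
def colSum (matriz : List (List Int)) : List (List Int) :=
  let naoZero : List Int :=
    (PySem.List.pyRange 0 (PySem.List.len (PySem.List.pyGetD matriz 0 [])) 1).foldl
      (fun naoZero j =>
        let clsum : Int :=
          (PySem.List.pyRange 0 (PySem.List.len matriz) 1).foldl
            (fun clsum i => clsum + PySem.List.pyGetD (PySem.List.pyGetD matriz i []) j 0) 0
        if clsum ≠ 0 then naoZero ++ [j] else naoZero) []
  (PySem.List.pyRange 0 (PySem.List.len matriz) 1).foldl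
    (fun resultMatrix linha =>
      let montaLinha : List Int := naoZero.foldl
        (fun ml n => ml ++ [PySem.List.pyGetD (PySem.List.pyGetD matriz linha []) n 0]) []
      resultMatrix ++ [montaLinha]) []

-- ===== PORT B =====
def colSum_alt (matriz : List (List Int)) : List (List Int) :=
  (PySem.List.pyRange 0 (PySem.List.len (PySem.List.pyGetD matriz 0 [])) 1).foldl
    (fun acc j =>
      if (matriz.map (fun row => PySem.List.pyGetD row j 0)).sum ≠ 0 then
        (acc.zip matriz).map (fun p => p.1 ++ [PySem.List.pyGetD p.2 j 0])
      else acc)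
    (matriz.map (fun _ => []))

-- ===== PRECONDITION & SPEC =====
-- Pre_ excludes exactly the inputs on which A raises IndexError: the empty matrix
-- (matriz[0] fails) and matrices in which some row is shorter than the first row.
def Pre_colSum (matriz : List (List Int)) : Prop :=
  matriz ≠ [] ∧ ∀ r ∈ matriz, (matriz.headD []).length ≤ r.length
instance (matriz : List (List Int)) : Decidable (Pre_colSum matriz) := by
  unfold Pre_colSum; infer_instance

def pvWitness_colSum : List (List Int) := [[1, 0], [2, 3]]

def Spec_colSum (matriz : List (List Int)) (out : List (List Int)) : Prop := out = colSum_alt matriz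
instance (matriz : List (List Int)) (out : List (List Int)) : Decidable (Spec_colSum matriz out) := by unfold Spec_colSum; infer_instance

-- ===== CLAIM (what is proved, stated in full; the proofs are below) =====
def Claim_equal_colSum : Prop := ∀ (matriz : List (List Int)), Dom_colSum matriz → Pre_colSum matriz → Spec_colSum matriz (colSum matriz)

-- ===== LEMMAS AND PROOFS =====

-- map over indices of a list = map over the list itself
theorem pvMapRangeGetD {α : Type} (l : List (List Int)) (f : List Int → α) :
    (List.range l.length).map (fun i => f (l.getD i [])) = l.map f := by
  induction l with
  | nil => simp
  | cons r rs ih =>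
    simp only [List.length_cons, List.range_succ_eq_map, List.map_cons, List.map_map]
    exact congrArg _ (by simpa [Function.comp_def] using ih)

-- A's result, characterised: keep, in every row, the entries in columns of nonzero sum
theorem colSum_char (matriz : List (List Int)) :
    colSum matriz =
      matriz.map (fun row =>
        (((List.range (PySem.List.pyGetD matriz 0 []).length).filter
            (fun j => (matriz.map (fun r => r.getD j 0)).sum ≠ 0)).map
          (fun j => row.getD j 0))) := by
  simp only [colSum, PySem.List.foldl_add,
    PySem.List.foldl_append_singleton_eq_map, PySem.List.foldl_append_ite_eq_filter,
    List.nil_append, zero_add, PySem.List.len_eq, PySem.List.pyRange_zero_natCast,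
    List.filter_map, List.map_map, Function.comp_def, PySem.List.pyGetD_natCast]
  have hpred : ∀ j : ℕ,
      (List.map (fun i => (matriz.getD i []).getD j 0) (List.range matriz.length)).sum =
        (matriz.map (fun r => r.getD j 0)).sum := by
    intro j; rw [pvMapRangeGetD matriz (fun r => r.getD j 0)]
  simp only [hpred]
  exact pvMapRangeGetD matriz (fun row =>
    List.map (fun j => row.getD j 0)
      (List.filter (fun x => decide ((List.map (fun r => r.getD x 0) matriz).sum ≠ 0))
        (List.range (PySem.List.pyGetD matriz 0 []).length)))

-- zipping a mapped list with the list itself pairs each element with its image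
theorem pvZipMapSelf {α β : Type} (l : List α) (f : α → β) :
    (l.map f).zip l = l.map (fun a => (f a, a)) := by
  induction l with
  | nil => rfl
  | cons a as ih => simp [ih]

-- B's fused pass, characterised by the same expression: invariant over the column loop
theorem colSum_alt_char (matriz : List (List Int)) :
    colSum_alt matriz =
      matriz.map (fun row =>
        (((List.range (PySem.List.pyGetD matriz 0 []).length).filter
            (fun j => (matriz.map (fun r => r.getD j 0)).sum ≠ 0)).map
          (fun j => row.getD j 0))) := by
  simp only [colSum_alt, PySem.List.len_eq, PySem.List.pyRange_zero_natCast,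
    List.foldl_map, PySem.List.pyGetD_natCast]
  generalize (PySem.List.pyGetD matriz 0 []).length = m
  induction m with
  | zero => simp
  | succ k ih =>
    rw [List.range_succ, List.foldl_append, ih, List.foldl_cons, List.foldl_nil]
    by_cases hk : (matriz.map (fun r => r.getD k 0)).sum ≠ 0
    · rw [if_pos hk, pvZipMapSelf, List.map_map]
      refine List.map_congr_left fun row _ => ?_
      simp only [List.getD_eq_getElem?_getD] at hk
      simp [List.filter_append, hk]
    · rw [if_neg hk]
      refine List.map_congr_left fun row _ => ?_
      simp only [ne_eq, not_not, List.getD_eq_getElem?_getD] at hk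
      simp [List.filter_append, hk]

-- ===== VERDICT (by name: the statement is the Claim_ definition above) =====
theorem colSum_spec : Claim_equal_colSum := by
  intro matriz _ _
  unfold Spec_colSum
  rw [colSum_char, colSum_alt_char]
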